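-- pv_equiv track=rewrite | github.com/tkylim/mahjong-framework | pkg/harbin/Winning.py | Get_Series
-- ===== SOURCE A (Python) =====
-- def Get_Series(tiles):
--     # returns a list of all the sequences
--     series = []
--
--     tiles_no_dup = sorted(list(set(tiles)))
--     temp = [[tiles_no_dup[0]]]
--
--     for i in range (1,len(tiles_no_dup)):
--         prev_tile = tiles_no_dup[i-1]
--
--         if tiles_no_dup[i] != prev_tile+1:
--             temp = [[tiles_no_dup[i]]]
--             continue
--
--         temp_series = []
--         for t in temp:
--             t.append(tiles_no_dup[i]) #adding the valid element above to the current series in progress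
--             if len(t) != 3:
--                 temp_series.append(t) #adding current element to a temporary series
--             else:
--                 series.append(t) #once reached length 3 the temp series gets added
--         temp = temp_series
--         temp.append([tiles_no_dup[i]])
--
--     return series
-- ===== SOURCE B (Python) =====
-- def Get_Series(tiles):
--     # Split the sorted distinct tiles into maximal consecutive runs,
--     # then slide a length-3 window over each run.
--     s = sorted(set(tiles))
--     runs = []
--     run = [s[0]]
--     for x in s[1:]:
--         if x == run[-1] + 1:
--             run.append(x)
--         else:
--             runs.append(run)
--             run = [x]
--     runs.append(run)
--     out = []
--     for run in runs:
--         while len(run) >= 3: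
--             out.append(run[:3])
--             run = run[1:]
--     return out
-- ===== Notes on version B (the rewrite author's own statement) =====
-- stated objective: simpler
-- what changed: B first splits the sorted deduplicated tiles into maximal consecutive runs and then slides a length-3 window over each run, instead of A's dynamic pool of in-progress partial series extended element by element.
import Mathlib
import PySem

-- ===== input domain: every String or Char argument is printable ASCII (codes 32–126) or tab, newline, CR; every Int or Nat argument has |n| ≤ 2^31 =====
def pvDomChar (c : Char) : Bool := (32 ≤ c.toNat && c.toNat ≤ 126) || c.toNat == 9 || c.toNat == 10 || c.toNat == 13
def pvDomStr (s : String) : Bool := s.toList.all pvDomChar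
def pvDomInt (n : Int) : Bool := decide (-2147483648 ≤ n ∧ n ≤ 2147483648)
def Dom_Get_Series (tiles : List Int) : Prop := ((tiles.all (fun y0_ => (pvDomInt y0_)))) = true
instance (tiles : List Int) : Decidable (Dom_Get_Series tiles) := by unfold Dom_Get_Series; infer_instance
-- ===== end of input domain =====

-- B replaces A's pool of in-progress partial series by a split into maximal
-- consecutive runs followed by a length-3 sliding window over each run (simpler).

-- ===== PORT A =====
-- the outer 'for i in range(1, len(...))' loop: structural recursion over the tail,
-- carrying prev_tile (= tiles_no_dup[i-1]), series and temp
def Get_Series_loop (series : List (List Int)) (temp : List (List Int)) (prev : Int) :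
    List Int → List (List Int)
  | [] => series
  | x :: rest =>
    if x ≠ prev + 1 then
      Get_Series_loop series [[x]] x rest
    else
      -- inner 'for t in temp' loop, accumulating (series, temp_series)
      let st := temp.foldl
        (fun (st : List (List Int) × List (List Int)) t =>
          let t' := t ++ [x]
          if t'.length ≠ 3 then (st.1, st.2 ++ [t']) else (st.1 ++ [t'], st.2))
        (series, [])
      Get_Series_loop st.1 (st.2 ++ [[x]]) x rest

def Get_Series (tiles : List Int) : List (List Int) :=
  let tiles_no_dup := PySem.List.sorted (PySem.Set.ofList tiles) (fun x => x) false
  match tiles_no_dup with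
  | [] => []   -- tiles_no_dup[0] raises IndexError in Python; excluded by Pre_
  | h :: rest => Get_Series_loop [] [[h]] h rest

-- ===== PORT B =====
-- the run-splitting loop 'for x in s[1:]': recursion over the tail with (runs, run);
-- run[-1] is run.getLast?.getD 0 (exact: run is always nonempty here)
def Get_Series_runs (runs : List (List Int)) (run : List Int) :
    List Int → List (List Int)
  | [] => runs ++ [run]
  | x :: rest =>
    if x = run.getLast?.getD 0 + 1 then Get_Series_runs runs (run ++ [x]) rest
    else Get_Series_runs (runs ++ [run]) [x] rest

-- the 'while len(run) >= 3: out.append(run[:3]); run = run[1:]' loop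
def Get_Series_win3 : List Int → List (List Int)
  | a :: b :: c :: rest => [a, b, c] :: Get_Series_win3 (b :: c :: rest)
  | _ => []

def Get_Series_alt (tiles : List Int) : List (List Int) :=
  let s := PySem.List.sorted (PySem.Set.ofList tiles) (fun x => x) false
  match s with
  | [] => []   -- s[0] raises IndexError in Python; excluded by Pre_
  | h :: rest =>
    (Get_Series_runs [] [h] rest).foldl (fun out r => out ++ Get_Series_win3 r) []

-- ===== PRECONDITION & SPEC =====
-- Pre_ excludes only the empty list, on which both Pythons raise IndexError at s[0].
def Pre_Get_Series (tiles : List Int) : Prop := tiles ≠ []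
instance (tiles : List Int) : Decidable (Pre_Get_Series tiles) := by unfold Pre_Get_Series; infer_instance
def pvWitness_Get_Series : List Int := ([1, 2, 3, 7])

def Spec_Get_Series (tiles : List Int) (out : List (List Int)) : Prop := out = Get_Series_alt tiles
instance (tiles : List Int) (out : List (List Int)) : Decidable (Spec_Get_Series tiles out) := by unfold Spec_Get_Series; infer_instance

-- ===== CLAIM (what is proved, stated in full; the proofs are below) =====
def Claim_equal_Get_Series : Prop := ∀ (tiles : List Int), Dom_Get_Series tiles → Pre_Get_Series tiles → Spec_Get_Series tiles (Get_Series tiles)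

-- ===== LEMMAS AND PROOFS =====

-- the last two elements of a list, if it has at least two
def lastTwo? (l : List Int) : Option (Int × Int) :=
  match l.reverse with
  | b :: a :: _ => some (a, b)
  | _ => none

-- A's temp, reconstructed from B's current run
def tempOf (run : List Int) : List (List Int) :=
  match lastTwo? run with
  | some (a, b) => [[a, b], [b]]
  | none => match run with
    | [b] => [[b]]
    | _ => []

theorem lastTwo?_append (run : List Int) (x : Int) (h : run ≠ []) :
    lastTwo? (run ++ [x]) = some (run.getLast?.getD 0, x) := by
  unfold lastTwo?
  rcases hr : run.reverse with _ | ⟨b, r⟩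
  · rw [List.reverse_eq_nil_iff] at hr; exact absurd hr h
  · have hb : run.getLast? = some b := by
      rw [List.getLast?_eq_head?_reverse, hr]; rfl
    rw [List.reverse_append, hr]
    simp [hb]

theorem getLast?_of_lastTwo? (run : List Int) (a b : Int)
    (h : lastTwo? run = some (a, b)) : run.getLast? = some b := by
  rw [List.getLast?_eq_head?_reverse]
  unfold lastTwo? at h
  rcases hr : run.reverse with _ | ⟨p, _ | ⟨q, r⟩⟩ <;> rw [hr] at h <;> simp_all

theorem win3_snoc (run : List Int) (x : Int) :
    Get_Series_win3 (run ++ [x]) =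
      Get_Series_win3 run ++
        (match lastTwo? run with
         | some (a, b) => [[a, b, x]]
         | none => []) := by
  match run with
  | [] => simp [Get_Series_win3, lastTwo?]
  | [b] => simp [Get_Series_win3, lastTwo?]
  | [a, b] => simp [Get_Series_win3, lastTwo?]
  | a :: b :: c :: rest =>
    have ih := win3_snoc (b :: c :: rest) x
    have hlt : lastTwo? (a :: b :: c :: rest) = lastTwo? (b :: c :: rest) := by
      unfold lastTwo?
      rcases hr : (b :: c :: rest).reverse with _ | ⟨p, _ | ⟨q, r⟩⟩
      · exact absurd hr (by simp)
      · have := congrArg List.length hr; simp at this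
      · have h2 : (a :: b :: c :: rest).reverse = p :: q :: (r ++ [a]) := by
          rw [List.reverse_cons, hr]; rfl
        simp only [h2]
    show [a, b, c] :: Get_Series_win3 ((b :: c :: rest) ++ [x]) = _
    rw [ih, hlt]
    simp [Get_Series_win3]

theorem run_singleton_of_lastTwo?_none (run : List Int) (hne : run ≠ [])
    (hl : lastTwo? run = none) : ∃ b, run = [b] := by
  unfold lastTwo? at hl
  rcases hr : run.reverse with _ | ⟨p, _ | ⟨q, r⟩⟩
  · rw [List.reverse_eq_nil_iff] at hr; exact absurd hr hne
  · exact ⟨p, by have := congrArg List.reverse hr; simpa using this⟩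
  · rw [hr] at hl; simp at hl

-- the main loop invariant: A's loop state is determined by B's (runs, run)
theorem loop_eq (rest : List Int) : ∀ (runs : List (List Int)) (run : List Int), run ≠ [] →
    Get_Series_loop
      ((runs.foldl (fun out r => out ++ Get_Series_win3 r) []) ++ Get_Series_win3 run)
      (tempOf run) (run.getLast?.getD 0) rest
    = (Get_Series_runs runs run rest).foldl (fun out r => out ++ Get_Series_win3 r) [] := by
  induction rest with
  | nil =>
    intro runs run _
    simp [Get_Series_loop, Get_Series_runs, List.foldl_append]
  | cons x rest ih =>
    intro runs run hne
    rw [Get_Series_loop, Get_Series_runs]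
    by_cases hx : x = run.getLast?.getD 0 + 1
    · rw [if_neg (not_not_intro hx), if_pos hx]
      rcases hl : lastTwo? run with _ | ⟨a, b⟩
      · -- run is a singleton [b]
        rcases run_singleton_of_lastTwo?_none run hne hl with ⟨b, rfl⟩
        have hih := ih runs [b, x] (by simp)
        have ht : tempOf [b, x] = [[b, x], [x]] := by simp [tempOf, lastTwo?]
        have hg : ([b, x] : List Int).getLast?.getD 0 = x := by simp
        rw [ht, hg] at hih
        simp only [tempOf, hl]
        have hc : (([b] : List Int) ++ [x]).length ≠ 3 := by simp
        simp only [List.foldl, if_pos hc]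
        simpa [Get_Series_win3] using hih
      · -- run ends in a, b : one triple [a, b, x] is emitted
        have hb : run.getLast? = some b := getLast?_of_lastTwo? run a b hl
        have hih := ih runs (run ++ [x]) (by simp)
        have ht : tempOf (run ++ [x]) = [[b, x], [x]] := by
          simp [tempOf, lastTwo?_append run x hne, hb]
        have hg : (run ++ [x]).getLast?.getD 0 = x := by simp
        have hw : Get_Series_win3 (run ++ [x]) = Get_Series_win3 run ++ [[a, b, x]] := by
          rw [win3_snoc, hl]
        rw [ht, hg, hw] at hih
        simp only [tempOf, hl]
        have hc1 : ¬((([a, b] : List Int) ++ [x]).length ≠ 3) := by simp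
        have hc2 : (([b] : List Int) ++ [x]).length ≠ 3 := by simp
        simp only [List.foldl, if_neg hc1, if_pos hc2]
        simpa [Get_Series_win3, List.append_assoc] using hih
    · rw [if_pos hx, if_neg hx]
      have hih := ih (runs ++ [run]) [x] (by simp)
      rw [List.foldl_append] at hih
      have ht : tempOf [x] = [[x]] := by simp [tempOf, lastTwo?]
      have hg : ([x] : List Int).getLast?.getD 0 = x := by simp
      rw [ht, hg] at hih
      simpa [Get_Series_win3] using hih

-- ===== VERDICT (by name: the statement is the Claim_ definition above) =====
theorem Get_Series_spec : Claim_equal_Get_Series := by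
  intro tiles _ _
  unfold Spec_Get_Series Get_Series Get_Series_alt
  rcases h : PySem.List.sorted (PySem.Set.ofList tiles) (fun x => x) false with _ | ⟨hd, rest⟩
  · rfl
  · have := loop_eq rest [] [hd] (by simp)
    simpa [tempOf, lastTwo?, Get_Series_win3, List.foldl] using this
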